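-- pv_equiv track=rewrite | github.com/chris-henry-holland/Portfolio | Python_projects/Project_Euler/Project_Euler_201_250.py | subsetsWithUniqueSumTotal
-- ===== SOURCE A (Python) =====
-- from typing import Dict, List, Tuple, Set, Union, Generator, Callable, Optional, Any, Hashable, Iterable
--
-- def subsetsWithUniqueSumTotal(nums: Set[int], k: int) -> int:
--     """
--     Given a set of integers nums, finds the sum of all integers for
--     which there is exactly one subset of nums with size k whose sum
--     is equal to that integer.
--
--     Args:
--         Required positional:
--         nums (set of ints): The set of integers of interest. Note
--                 that this cannot contain repeated elements.
--         k (int): The size of the subsets of nums for which an integer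
--                 included in the sum can be the sum of exactly one
--                 of these subsets.
--
--     Returns:
--     Integer (int) giving the sum of all integers for which there is
--     exactly one subset of nums with size k whose sum is equal to that
--     integer.
--
--     Outline of rationale:
--     This is solved using bottom up dynamic programming, for integer m
--     increasing from 0 to n finding the subset sums including the first m
--     elements of the set, by adding the m:th element of nums to the
--     possible subset sums including the first (m - 1) elements (i.e.
--     the result of the previous step), keeping track of the number of
--     included elements (capping this at k) and whether that sum for that
--     number of included elements can be achieved in more than one way.
--     This is optimised for k > len(nums) / 2 by noting that if an integer
--     a is a unique sum among subsets of size k, then as its complement,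
--     (sum(nums) - a) is a unique sum among subsets of size (len(nums) - k).
--     We can additionally save space by noting that sums of sets including
--     more elements cannot by inserting further elements affect the sums
--     of sets including fewer elements. This allows us to maintain a single
--     structure with the results, taking care when adding a new element
--     to iterate over the structure in decreasing order of number of
--     included elements.
--     Furthermore, for the final elements added, we need only focus on
--     those subsets that have a number of elements that stand a chance
--     of reaching the required number of elements (so those for which,
--     even if all the rest of the elements to be inserted are included
--     would still result in fewer than the required number of elements
--     can be ignored).
--     """
--     n = len(nums)
--     rev = False
--     if (k << 1) > n:
--         k = n - k
--         rev = True
--     if k < 0: return 0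
--     elif not k: return 1
--     nums2 = sorted(nums)
--     curr = [{0: True}]
--     for j, num in enumerate(nums2):
--         if len(curr) <= k: curr.append({})
--         for i in reversed(range(max(0, k - (n - j)), len(curr) - 1)):
--             for num2, b in curr[i].items():
--                 num3 = num + num2
--                 curr[i + 1][num3] = b and num3 not in curr[i + 1].keys()
--     if len(curr) <= k: return 0
--     res = sum(x for x, y in curr[k].items() if y)
--     return sum(nums) * sum(curr[k].values()) - res if rev else res
-- ===== SOURCE B (Python) =====
-- def subsetsWithUniqueSumTotal(nums, k):
--     """Sum of integers achievable as the sum of exactly one size-k subset of nums.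
--
--     Direct enumeration: list all size-k combination sums, tally them,
--     and add up the sums that occur exactly once.
--     """
--     if k < 0:
--         return 0
--
--     def combo_sums(xs, r):
--         # sums of all size-r combinations of xs, in lexicographic index order
--         if r == 0:
--             return [0]
--         if not xs:
--             return []
--         rest = xs[1:]
--         return [xs[0] + s for s in combo_sums(rest, r - 1)] + combo_sums(rest, r)
--
--     counter = {}
--     for s in combo_sums(sorted(nums), k):
--         counter[s] = counter.get(s, 0) + 1
--     return sum(s for s, cnt in counter.items() if cnt == 1)
-- ===== Notes on version B (the rewrite author's own statement) =====
-- stated objective: simpler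
-- what changed: Replaces A's complement-symmetric in-place DP over a list of per-size sum->uniqueness dicts (with level pruning and the k>n/2 flip) by direct recursive enumeration of all size-k combination sums tallied in one dict, summing the sums that occur exactly once.
-- intended difference: On k = 0 and on k = len(nums) (when sum(nums) != 1), A returns the constant 1 from its 'if not k: return 1' guard after the complement flip, while B returns the intended sum of uniquely-achievable size-k subset sums: 0 for k = 0 and sum(nums) for k = len(nums); on these inputs A's 1 is simply wrong for the function's stated purpose. — e.g. on subsetsWithUniqueSumTotal([2, 3], 2): A returns 1, B returns 5
import Mathlib
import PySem

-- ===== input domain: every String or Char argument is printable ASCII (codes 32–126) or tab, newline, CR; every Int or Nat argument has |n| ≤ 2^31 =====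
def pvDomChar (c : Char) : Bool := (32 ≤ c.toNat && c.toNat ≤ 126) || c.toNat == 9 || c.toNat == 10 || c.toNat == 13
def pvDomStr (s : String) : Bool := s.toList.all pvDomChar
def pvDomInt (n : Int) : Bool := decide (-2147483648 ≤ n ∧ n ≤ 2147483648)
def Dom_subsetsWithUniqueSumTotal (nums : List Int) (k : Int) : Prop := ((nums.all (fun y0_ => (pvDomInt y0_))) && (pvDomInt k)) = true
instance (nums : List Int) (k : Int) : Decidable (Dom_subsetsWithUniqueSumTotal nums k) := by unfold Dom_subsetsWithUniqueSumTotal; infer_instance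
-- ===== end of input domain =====

-- B replaces A's in-place complement-symmetric DP over a list of per-size sum dicts by direct
-- enumeration of all size-k combination sums with a tally dict (objective: simpler; not faster).

-- ===== PORT A =====
-- inner dict-merge: 'for num2, b in curr[i].items(): num3 = num + num2; curr[i+1][num3] = b and num3 not in curr[i+1].keys()'
def pvMergeA (num : Int) (dlow d : PySem.Dict Int Bool) : PySem.Dict Int Bool :=
  dlow.items.foldl (fun d p => d.insert (num + p.1) (p.2 && !(d.contains (num + p.1)))) d

-- one iteration of A's outer 'for j, num in enumerate(nums2)' loop
def pvStepA (n k2 : Int) (curr : List (PySem.Dict Int Bool)) (jnum : Int × Int) : List (PySem.Dict Int Bool) :=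
  let curr := if (curr.length : Int) ≤ k2 then curr ++ [PySem.Dict.empty] else curr
  ((PySem.List.pyRange (max 0 (k2 - (n - jnum.1))) ((curr.length : Int) - 1) 1).reverse).foldl
    (fun curr i =>
      PySem.List.pySetD curr (i + 1)
        (pvMergeA jnum.2 (PySem.List.pyGetD curr i PySem.Dict.empty)
          (PySem.List.pyGetD curr (i + 1) PySem.Dict.empty)))
    curr

def subsetsWithUniqueSumTotal (nums : List Int) (k : Int) : Int :=
  let n : Int := (nums.length : Int)
  let rev : Bool := decide (k <<< (1 : Nat) > n)
  let k2 : Int := if k <<< (1 : Nat) > n then n - k else k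
  if k2 < 0 then 0
  else if k2 = 0 then 1
  else
    let nums2 : List Int := PySem.List.sorted nums (fun x => x) false
    let curr : List (PySem.Dict Int Bool) :=
      (PySem.List.enumerate nums2).foldl (pvStepA n k2) [PySem.Dict.ofList [(0, true)]]
    if (curr.length : Int) ≤ k2 then 0
    else
      let dk := PySem.List.pyGetD curr k2 PySem.Dict.empty
      -- sum(x for x, y in curr[k].items() if y)
      let res := (dk.items.filterMap (fun p => if p.2 then some p.1 else none)).sum
      -- sum(curr[k].values()) sums Python bools as 0/1
      if rev then nums.sum * ((dk.values.map (fun b => if b then (1 : Int) else 0)).sum) - res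
      else res

-- ===== PORT B =====
-- sums of all size-r combinations of xs, in lexicographic index order
def pvComboSums : List Int → Nat → List Int
  | _, 0 => [0]
  | [], _ + 1 => []
  | x :: rest, r + 1 => ((pvComboSums rest r).map (fun s => x + s)) ++ pvComboSums rest (r + 1)

def subsetsWithUniqueSumTotal_alt (nums : List Int) (k : Int) : Int :=
  if k < 0 then 0
  else
    let counter : PySem.Dict Int Int :=
      (pvComboSums (PySem.List.sorted nums (fun x => x) false) k.toNat).foldl
        (fun d s => d.insert s (d.getD s 0 + 1)) PySem.Dict.empty
    (counter.items.filterMap (fun p => if p.2 == (1 : Int) then some p.1 else none)).sum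

-- ===== PRECONDITION & SPEC =====
-- On k = 0 and on k = len(nums) (when the total isn't 1), A returns the constant 1 from its
-- 'if not k: return 1' guard after the complement flip, while B returns the intended sum of
-- uniquely-achievable size-k subset sums (0 for k = 0, sum(nums) for k = len(nums)).
def D_subsetsWithUniqueSumTotal (nums : List Int) (k : Int) : Prop :=
  k = 0 ∨ (k = (nums.length : Int) ∧ nums.sum ≠ 1)
instance (nums : List Int) (k : Int) : Decidable (D_subsetsWithUniqueSumTotal nums k) := by
  unfold D_subsetsWithUniqueSumTotal; infer_instance

def Spec_subsetsWithUniqueSumTotal (nums : List Int) (k : Int) (out : Int) : Prop :=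
  ¬ D_subsetsWithUniqueSumTotal nums k → out = subsetsWithUniqueSumTotal_alt nums k
instance (nums : List Int) (k : Int) (out : Int) : Decidable (Spec_subsetsWithUniqueSumTotal nums k out) := by
  unfold Spec_subsetsWithUniqueSumTotal; infer_instance

def pvDiffWitness_subsetsWithUniqueSumTotal : List Int × Int := ([2, 3], 2)
def pvDiffWitnessOut_subsetsWithUniqueSumTotal : Int × Int := (1, 5)

-- ===== CLAIM (what is proved, stated in full; the proofs are below) =====
def Claim_unchanged_subsetsWithUniqueSumTotal : Prop := ∀ (nums : List Int) (k : Int), Dom_subsetsWithUniqueSumTotal nums k → Spec_subsetsWithUniqueSumTotal nums k (subsetsWithUniqueSumTotal nums k)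
def Claim_changed_subsetsWithUniqueSumTotal : Prop := Dom_subsetsWithUniqueSumTotal (pvDiffWitness_subsetsWithUniqueSumTotal.1) (pvDiffWitness_subsetsWithUniqueSumTotal.2) ∧ D_subsetsWithUniqueSumTotal (pvDiffWitness_subsetsWithUniqueSumTotal.1) (pvDiffWitness_subsetsWithUniqueSumTotal.2) ∧ subsetsWithUniqueSumTotal (pvDiffWitness_subsetsWithUniqueSumTotal.1) (pvDiffWitness_subsetsWithUniqueSumTotal.2) = pvDiffWitnessOut_subsetsWithUniqueSumTotal.1 ∧ subsetsWithUniqueSumTotal_alt (pvDiffWitness_subsetsWithUniqueSumTotal.1) (pvDiffWitness_subsetsWithUniqueSumTotal.2) = pvDiffWitnessOut_subsetsWithUniqueSumTotal.2 ∧ pvDiffWitnessOut_subsetsWithUniqueSumTotal.1 ≠ pvDiffWitnessOut_subsetsWithUniqueSumTotal.2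
def Claim_exact_subsetsWithUniqueSumTotal : Prop := ∀ (nums : List Int) (k : Int), Dom_subsetsWithUniqueSumTotal nums k → D_subsetsWithUniqueSumTotal nums k → subsetsWithUniqueSumTotal nums k ≠ subsetsWithUniqueSumTotal_alt nums k

-- ===== LEMMAS AND PROOFS =====

-- ---- proof-side abbreviations ----

-- number of size-r combinations of l with sum s
def pvCnt (l : List Int) (r : Nat) (s : Int) : Nat := (pvComboSums l r).count s

-- the dict at one DP level represents the counts c: keys are the achievable sums,
-- the stored bool says whether the sum is achieved exactly once
def pvDInv (d : PySem.Dict Int Bool) (c : Int → Nat) : Prop :=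
  d.keys.Nodup ∧ ∀ s : Int, d.get? s = if 0 < c s then some (c s == 1) else none

-- the inner 'for i in reversed(range(...))' body of pvStepA, as a named function
def pvInnerF (num : Int) (curr : List (PySem.Dict Int Bool)) (i : Int) : List (PySem.Dict Int Bool) :=
  PySem.List.pySetD curr (i + 1)
    (pvMergeA num (PySem.List.pyGetD curr i PySem.Dict.empty)
      (PySem.List.pyGetD curr (i + 1) PySem.Dict.empty))

-- invariant of A's outer loop after j of the sorted elements have been processed
def pvOuterInv (L : List Int) (K : Nat) (j : Nat) (curr : List (PySem.Dict Int Bool)) : Prop :=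
  curr.length = min (j + 1) (K + 1) ∧
  ∀ m : Nat, m ≤ min j K → (K : Int) ≤ ((L.length : Int) - j) + m →
    pvDInv (PySem.List.pyGetD curr (m : Int) PySem.Dict.empty) (pvCnt (L.take j) m)

-- canonical value: sum of the sums achieved by exactly one size-k combination
def pvU (cs : List Int) : Int := ∑ s ∈ cs.toFinset, (if cs.count s = 1 then s else 0)

-- ---- pvComboSums / pvCnt facts ----

lemma pvComboSums_zero (l : List Int) : pvComboSums l 0 = [0] := by
  cases l <;> rfl

lemma pvComboSums_of_lt : ∀ (l : List Int) (r : Nat), l.length < r → pvComboSums l r = [] := by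
  intro l
  induction l with
  | nil => intro r hr; cases r with
    | zero => simp at hr
    | succ r => rfl
  | cons x rest ih =>
    intro r hr
    cases r with
    | zero => simp at hr
    | succ r =>
      simp only [pvComboSums]
      simp only [List.length_cons] at hr
      rw [ih r (by omega), ih (r+1) (by omega)]
      simp

lemma pvComboSums_self : ∀ (l : List Int), pvComboSums l l.length = [l.sum] := by
  intro l
  induction l with
  | nil => rfl
  | cons x rest ih =>
    simp only [List.length_cons, pvComboSums, ih, pvComboSums_of_lt rest (rest.length + 1) (by omega)]
    simp

lemma pvCnt_zero (l : List Int) (s : Int) : pvCnt l 0 s = if s = 0 then 1 else 0 := by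
  rw [pvCnt, pvComboSums_zero]
  by_cases h : s = 0 <;> simp [h, eq_comm]

lemma pvCnt_cons (x : Int) (l : List Int) (r : Nat) (s : Int) :
    pvCnt (x :: l) (r + 1) s = pvCnt l r (s - x) + pvCnt l (r + 1) s := by
  simp only [pvCnt, pvComboSums, List.count_append]
  congr 1
  have := List.count_map_of_injective (pvComboSums l r) (fun t => x + t) (fun a b h => by simpa using h) (s - x)
  simpa using this

lemma pvCnt_snoc_zero (l : List Int) (x : Int) (s : Int) : pvCnt (l ++ [x]) 0 s = pvCnt l 0 s := by
  simp [pvCnt, pvComboSums_zero]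

lemma pvCnt_snoc : ∀ (l : List Int) (x : Int) (r : Nat) (s : Int),
    pvCnt (l ++ [x]) (r + 1) s = pvCnt l (r + 1) s + pvCnt l r (s - x) := by
  intro l
  induction l with
  | nil =>
    intro x r s
    cases r with
    | zero =>
      simp [pvCnt, pvComboSums, List.count_singleton, List.count_nil]
      split_ifs <;> omega
    | succ r =>
      have h1 : pvCnt ([] ++ [x]) (r + 1 + 1) s = 0 := by
        simp [pvCnt, pvComboSums_of_lt [x] (r+2) (by simp)]
      have h2 : pvCnt [] (r + 1) (s - x) = 0 := by simp [pvCnt, pvComboSums]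
      simp [pvCnt, pvComboSums]
  | cons y t ih =>
    intro x r s
    have hc : (y :: t) ++ [x] = y :: (t ++ [x]) := rfl
    rw [hc, pvCnt_cons]
    cases r with
    | zero =>
      rw [pvCnt_snoc_zero, pvCnt_cons, ih, pvCnt_zero (y :: t) (s - x), pvCnt_zero t (s - x)]
      omega
    | succ r =>
      rw [ih, ih, pvCnt_cons, pvCnt_cons]
      have : s - y - x = s - x - y := by omega
      rw [this]
      omega

-- ---- the merge fold ----

lemma pvMergeFold_get? (num : Int) (f : Int → Bool) :
    ∀ (ps : List (Int × Bool)) (d : PySem.Dict Int Bool),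
      (ps.map Prod.fst).Nodup → (∀ p ∈ ps, p.2 = f p.1) → ∀ s : Int,
      (ps.foldl (fun d p => d.insert (num + p.1) (p.2 && !(d.contains (num + p.1)))) d).get? s
        = if (s - num) ∈ ps.map Prod.fst then some (f (s - num) && !(d.contains s)) else d.get? s := by
  intro ps
  induction ps with
  | nil => intro d _ _ s; simp
  | cons p rest ih =>
    intro d hnd hval s
    simp only [List.map_cons, List.nodup_cons] at hnd
    obtain ⟨ht0, hnd'⟩ := hnd
    have hval' : ∀ q ∈ rest, q.2 = f q.1 := fun q hq => hval q (List.mem_cons_of_mem _ hq)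
    have hb0 : p.2 = f p.1 := hval p List.mem_cons_self
    simp only [List.foldl_cons]
    rw [ih _ hnd' hval' s]
    by_cases hs : s - num = p.1
    · rw [if_neg (hs ▸ ht0), if_pos (by simp [List.mem_cons, hs])]
      have hnum : num + p.1 = s := by omega
      rw [hnum, PySem.Dict.get?_insert_self, hs, hb0]
    · have hne : s ≠ num + p.1 := by omega
      by_cases hm : s - num ∈ rest.map Prod.fst
      · rw [if_pos hm, if_pos (by simp [List.mem_cons, hm])]
        rw [PySem.Dict.contains_insert]
        simp [show (s == num + p.1) = false by simpa using hne]
      · rw [if_neg hm, if_neg (by simp [List.mem_cons, hs, hm])]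
        rw [PySem.Dict.get?_insert]
        simp [hne]

lemma pvDInv_merge (num : Int) (dlow d : PySem.Dict Int Bool) (cL cH : Int → Nat)
    (hl : pvDInv dlow cL) (hh : pvDInv d cH) :
    pvDInv (pvMergeA num dlow d) (fun s => cH s + cL (s - num)) := by
  obtain ⟨hndl, hspecl⟩ := hl
  obtain ⟨hndh, hspech⟩ := hh
  constructor
  · exact PySem.Dict.nodup_keys_foldl_insert_key dlow.items (fun p => num + p.1)
      (fun d p => p.2 && !(d.contains (num + p.1))) d hndh
  · intro s
    show (pvMergeA num dlow d).get? s
      = if 0 < cH s + cL (s - num) then some ((cH s + cL (s - num)) == 1) else none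
    have hkeys : dlow.keys = dlow.items.map Prod.fst := rfl
    have hval : ∀ p ∈ dlow.items, p.2 = (fun t => cL t == 1) p.1 := by
      intro p hp
      have hg := PySem.Dict.get?_of_mem_items (d := dlow) (by exact hp) hndl
      rw [hspecl p.1] at hg
      by_cases hc : 0 < cL p.1
      · rw [if_pos hc] at hg; exact (Option.some.inj hg).symm
      · rw [if_neg hc] at hg; exact absurd hg (by simp)
    have hmem : ∀ t : Int, t ∈ dlow.items.map Prod.fst ↔ 0 < cL t := by
      intro t
      rw [← hkeys]
      constructor
      · intro h
        by_contra hc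
        have h2 := hspecl t
        rw [if_neg hc] at h2
        exact (PySem.Dict.get?_eq_none_iff_not_mem_keys _ _).mp h2 h
      · intro h
        by_contra hc
        have h2 := (PySem.Dict.get?_eq_none_iff_not_mem_keys _ _).mpr hc
        rw [hspecl t, if_pos h] at h2
        exact absurd h2 (by simp)
    rw [pvMergeA, pvMergeFold_get? num (fun t => cL t == 1) dlow.items d hndl hval s]
    have hcont : d.contains s = decide (0 < cH s) := by
      rw [PySem.Dict.contains_eq_isSome_get?, hspech s]
      by_cases hc : 0 < cH s <;> simp [hc]
    by_cases hm : s - num ∈ dlow.items.map Prod.fst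
    · have hcl : 0 < cL (s - num) := (hmem _).mp hm
      rw [if_pos hm, if_pos (by omega), hcont]
      congr 1
      have key : ∀ a b : Nat, 0 < a → ((a == 1) && !decide (0 < b)) = ((b + a) == 1) := by
        intro a b ha
        by_cases hb : 0 < b <;> by_cases ha1 : a = 1 <;>
          simp [hb, ha1] <;> omega
      exact key (cL (s - num)) (cH s) hcl
    · have hcl : cL (s - num) = 0 := by
        have h2 := (hmem (s - num)).not.mp hm
        omega
      rw [if_neg hm, hspech s, hcl, Nat.add_zero]

-- ---- the inner (levels) fold ----

lemma pvInnerF_length (num : Int) : ∀ (rng : List Int) (curr : List (PySem.Dict Int Bool)),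
    (rng.foldl (pvInnerF num) curr).length = curr.length := by
  intro rng
  induction rng with
  | nil => intro curr; rfl
  | cons i rest ih =>
    intro curr
    simp only [List.foldl_cons]
    rw [ih]
    simp [pvInnerF, PySem.List.length_pySetD]

lemma pvGetD_setD {α : Type} (xs : List α) (i : Int) (v : α) (m : Int) (dflt : α)
    (h0 : 0 ≤ i) (h : i < (xs.length : Int)) (hm : 0 ≤ m) :
    PySem.List.pyGetD (PySem.List.pySetD xs i v) m dflt = if m = i then v else PySem.List.pyGetD xs m dflt := by
  have hi : i = ((i.toNat : Nat) : Int) := by omega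
  have hmm : m = ((m.toNat : Nat) : Int) := by omega
  have hlt : i.toNat < xs.length := by omega
  rw [hi, hmm]
  simp only [PySem.List.pySetD_natCast, PySem.List.pyGetD_natCast]
  by_cases he : m.toNat = i.toNat
  · simp [he, List.getD_eq_getElem?_getD, hlt]
  · have hne : i.toNat ≠ m.toNat := fun hx => he hx.symm
    simp [List.getD_eq_getElem?_getD, List.getElem?_set_ne hne]
    intro hx
    exact absurd (show m.toNat = i.toNat by omega) he

lemma pvInner_spec (num lo : Int) (hlo : 0 ≤ lo) :
    ∀ (t : Nat) (curr : List (PySem.Dict Int Bool)),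
      lo + (t : Int) ≤ (curr.length : Int) - 1 →
      ∀ m : Int, 0 ≤ m →
      PySem.List.pyGetD (((PySem.List.pyRange lo (lo + (t : Int)) 1).reverse).foldl (pvInnerF num) curr) m PySem.Dict.empty
        = if lo + 1 ≤ m ∧ m ≤ lo + (t : Int) then
            pvMergeA num (PySem.List.pyGetD curr (m - 1) PySem.Dict.empty) (PySem.List.pyGetD curr m PySem.Dict.empty)
          else PySem.List.pyGetD curr m PySem.Dict.empty := by
  intro t
  induction t with
  | zero =>
    intro curr hlen m hm
    rw [show lo + ((0 : Nat) : Int) = lo by simp, PySem.List.pyRange_one_eq_nil le_rfl]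
    simp only [List.reverse_nil, List.foldl_nil]
    rw [if_neg (by omega)]
  | succ t ih =>
    intro curr hlen m hm
    have hcast : lo + ((t + 1 : Nat) : Int) = (lo + (t : Int)) + 1 := by push_cast; ring
    rw [hcast, PySem.List.pyRange_one_succ_right (by omega)]
    simp only [List.reverse_append, List.reverse_cons, List.reverse_nil, List.nil_append,
      List.singleton_append, List.foldl_cons]
    have hlen1 : ((pvInnerF num curr (lo + (t : Int))).length : Int) = (curr.length : Int) := by
      simp [pvInnerF, PySem.List.length_pySetD]
    rw [ih (pvInnerF num curr (lo + (t : Int))) (by omega) m hm]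
    have hset : ∀ x : Int, 0 ≤ x →
        PySem.List.pyGetD (pvInnerF num curr (lo + (t : Int))) x PySem.Dict.empty
          = if x = lo + (t : Int) + 1 then
              pvMergeA num (PySem.List.pyGetD curr (lo + (t : Int)) PySem.Dict.empty)
                (PySem.List.pyGetD curr (lo + (t : Int) + 1) PySem.Dict.empty)
            else PySem.List.pyGetD curr x PySem.Dict.empty := by
      intro x hx
      rw [pvInnerF, pvGetD_setD _ _ _ _ _ (by omega) (by omega) hx]
    by_cases hmt : m = lo + (t : Int) + 1
    · rw [if_neg (by omega), hset m hm, if_pos hmt, if_pos (by omega), hmt]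
      have h1 : lo + (t : Int) + 1 - 1 = lo + (t : Int) := by ring
      rw [h1]
    · by_cases hin : lo + 1 ≤ m ∧ m ≤ lo + (t : Int)
      · rw [if_pos hin, hset m hm, if_neg hmt, hset (m - 1) (by omega), if_neg (by omega),
          if_pos (by omega)]
      · rw [if_neg hin, hset m hm, if_neg hmt, if_neg (by omega)]

-- ---- the outer loop ----

lemma pvStepA_eq (n k2 : Int) (curr : List (PySem.Dict Int Bool)) (jnum : Int × Int) :
    pvStepA n k2 curr jnum =
      (let curr := if (curr.length : Int) ≤ k2 then curr ++ [PySem.Dict.empty] else curr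
       ((PySem.List.pyRange (max 0 (k2 - (n - jnum.1))) ((curr.length : Int) - 1) 1).reverse).foldl
         (pvInnerF jnum.2) curr) := rfl

lemma pvDInv_congr (d : PySem.Dict Int Bool) (c c' : Int → Nat) (h : ∀ s, c s = c' s)
    (hd : pvDInv d c) : pvDInv d c' := by
  obtain ⟨h1, h2⟩ := hd
  exact ⟨h1, fun s => by rw [h2 s, h s]⟩

lemma pvDInv_empty (c : Int → Nat) (h : ∀ s, c s = 0) : pvDInv PySem.Dict.empty c := by
  constructor
  · simp [PySem.Dict.keys_empty]
  · intro s
    rw [PySem.Dict.get?_empty, h s]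
    simp

lemma pvGetD_append_left {α : Type} (xs : List α) (y : α) (mi : Int) (dflt : α)
    (h0 : 0 ≤ mi) (h : mi < (xs.length : Int)) :
    PySem.List.pyGetD (xs ++ [y]) mi dflt = PySem.List.pyGetD xs mi dflt := by
  have hmm : mi = ((mi.toNat : Nat) : Int) := by omega
  rw [hmm]
  simp only [PySem.List.pyGetD_natCast]
  rw [List.getD_append _ _ _ _ (by omega)]

lemma pvGetD_append_self {α : Type} (xs : List α) (y : α) (dflt : α) :
    PySem.List.pyGetD (xs ++ [y]) ((xs.length : Nat) : Int) dflt = y := by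
  simp only [PySem.List.pyGetD_natCast]
  rw [List.getD_append_right _ _ _ _ (le_refl _)]
  simp

lemma pvStepA_spec (L : List Int) (K j : Nat) (num : Int) (t' : List Int)
    (hK1 : 1 ≤ K) (hKn : K ≤ L.length) (hdrop : L.drop j = num :: t')
    (curr : List (PySem.Dict Int Bool)) (hinv : pvOuterInv L K j curr) :
    pvOuterInv L K (j + 1) (pvStepA (L.length : Int) (K : Int) curr ((j : Int), num)) := by
  obtain ⟨hlen, hmv⟩ := hinv
  have hjn : j < L.length := by
    have h1 := congrArg List.length hdrop
    simp only [List.length_drop, List.length_cons] at h1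
    omega
  have hLj : L[j]? = some num := by
    have h0 : (L.drop j)[0]? = some num := by rw [hdrop]; rfl
    rw [List.getElem?_drop] at h0
    simpa using h0
  have htake : L.take (j + 1) = L.take j ++ [num] := by
    rw [List.take_add_one, hLj]
    rfl
  have hlentake : (L.take j).length = j := by simp [List.length_take]; omega
  rw [pvStepA_eq]
  simp only []
  -- the appended state
  set curr0 := if ((curr.length : Int)) ≤ (K : Int) then curr ++ [PySem.Dict.empty] else curr with hcurr0
  have hlen0 : curr0.length = min (j + 2) (K + 1) := by
    rw [hcurr0]
    by_cases hap : j + 1 ≤ K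
    · rw [if_pos (by push_cast; omega)]
      simp [hlen]
      omega
    · rw [if_neg (by push_cast; omega)]
      rw [hlen]
      omega
  have inv0 : ∀ mi : Int, 0 ≤ mi → mi ≤ ((min (j + 1) K : Nat) : Int) →
      (K : Int) ≤ ((L.length : Int) - j) + mi →
      pvDInv (PySem.List.pyGetD curr0 mi PySem.Dict.empty) (pvCnt (L.take j) mi.toNat) := by
    intro mi h0 hup hfr
    have hmc : mi = ((mi.toNat : Nat) : Int) := by omega
    by_cases hap : j + 1 ≤ K
    · have hlc : curr.length = j + 1 := by rw [hlen]; omega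
      rw [hcurr0, if_pos (by rw [hlc]; push_cast; omega)]
      by_cases hmj : mi ≤ (j : Int)
      · rw [pvGetD_append_left _ _ _ _ h0 (by omega)]
        have := hmv mi.toNat (by omega) (by omega)
        rw [← hmc] at this
        exact this
      · have hm1 : mi = ((j : Int) + 1) := by push_cast at hup; omega
        have hm2 : mi = (((curr.length : Nat)) : Int) := by rw [hlc]; push_cast; omega
        rw [hm2, pvGetD_append_self]
        apply pvDInv_empty
        intro s
        have hnone : pvComboSums (L.take j) curr.length = [] := by
          apply pvComboSums_of_lt
          rw [hlentake, hlc]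
          omega
        simp [pvCnt, hnone]
    · rw [hcurr0, if_neg (by rw [hlen]; push_cast; omega)]
      have := hmv mi.toNat (by omega) (by omega)
      rw [← hmc] at this
      exact this
  -- the inner fold
  set lo := max 0 ((K : Int) - ((L.length : Int) - (((j : Int), num).1))) with hlo
  have hlo' : lo = max 0 ((K : Int) - ((L.length : Int) - (j : Int))) := by rw [hlo]
  have hlonn : 0 ≤ lo := le_max_left _ _
  have ha : lo ≤ (curr0.length : Int) - 1 := by
    rw [hlen0]; push_cast; omega
  set t := (((curr0.length : Int) - 1) - lo).toNat with ht
  have hteq : (curr0.length : Int) - 1 = lo + (t : Int) := by rw [ht]; omega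
  constructor
  · rw [hteq, pvInnerF_length]
    exact hlen0
  · intro m hm hfr
    rw [hteq, pvInner_spec ((( (j : Int), num)).2) lo hlonn t curr0 (by omega) (m : Int) (by positivity)]
    simp only []
    have hma : (m : Int) ≤ lo + (t : Int) := by
      rw [← hteq, hlen0]
      push_cast
      omega
    by_cases hge : lo + 1 ≤ (m : Int)
    · rw [if_pos ⟨hge, hma⟩]
      have hm1 : 1 ≤ m := by omega
      obtain ⟨m', rfl⟩ : ∃ m', m = m' + 1 := ⟨m - 1, by omega⟩
      have hlow := inv0 ((m' + 1 : Nat) - 1) (by push_cast; omega) (by push_cast; omega) (by push_cast at hge ⊢; omega)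
      have hhigh := inv0 ((m' + 1 : Nat)) (by positivity) (by push_cast; omega) (by push_cast at hfr ⊢; omega)
      have hmerge := pvDInv_merge num _ _ _ _ hlow hhigh
      apply pvDInv_congr _ _ _ _ hmerge
      intro s
      have htn : (((m' + 1 : Nat) : Int) - 1).toNat = m' := by omega
      have htn2 : ((m' + 1 : Nat) : Int).toNat = m' + 1 := by omega
      rw [htn, htn2, htake, pvCnt_snoc]
    · rw [if_neg (by intro hx; exact hge hx.1)]
      have hm0 : (m : Int) = 0 ∧ lo = 0 := by
        constructor <;> [skip; skip] <;>
        · by_contra hc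
          push_cast at hfr
          omega
      obtain ⟨hm0', hlo0⟩ := hm0
      have := inv0 (m : Int) (by positivity) (by push_cast; omega) (by push_cast at hfr ⊢; omega)
      apply pvDInv_congr _ _ _ _ this
      intro s
      have htn : ((m : Nat) : Int).toNat = m := by omega
      rw [htn]
      have hmz : m = 0 := by omega
      subst hmz
      rw [pvCnt_zero, pvCnt_zero]

lemma pvOuter_spec (L : List Int) (K : Nat) (hK1 : 1 ≤ K) (hKn : K ≤ L.length) :
    ∀ (t : List Int) (j : Nat) (curr : List (PySem.Dict Int Bool)),
      L.drop j = t → j ≤ L.length → pvOuterInv L K j curr →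
      pvOuterInv L K L.length ((PySem.List.enumerate t (j : Int)).foldl (pvStepA (L.length : Int) (K : Int)) curr) := by
  intro t
  induction t with
  | nil =>
    intro j curr hdrop hjle hinv
    have hj : j = L.length := by
      have h1 := congrArg List.length hdrop
      simp only [List.length_drop, List.length_nil] at h1
      omega
    subst hj
    simpa using hinv
  | cons num t' ih =>
    intro j curr hdrop hjle hinv
    rw [PySem.List.enumerate_cons]
    simp only [List.foldl_cons]
    have hjn : j < L.length := by
      have h1 := congrArg List.length hdrop
      simp only [List.length_drop, List.length_cons] at h1
      omega
    have hstep := pvStepA_spec L K j num t' hK1 hKn hdrop curr hinv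
    have hdrop' : L.drop (j + 1) = t' := by
      have h2 : L.drop (j + 1) = (L.drop j).drop 1 := by
        rw [List.drop_drop]
      rw [h2, hdrop]
      rfl
    have hres := ih (j + 1) (pvStepA ((L.length : Nat) : Int) ((K : Nat) : Int) curr (((j : Nat) : Int), num)) hdrop' (by omega) hstep
    have hcast : (((j + 1 : Nat)) : Int) = ((j : Nat) : Int) + 1 := by push_cast; ring
    rw [hcast] at hres
    exact hres

lemma pvA_dict (L : List Int) (K : Nat) (hK1 : 1 ≤ K) (hKn : K ≤ L.length) :
    ((PySem.List.enumerate L 0).foldl (pvStepA (L.length : Int) (K : Int)) [PySem.Dict.ofList [(0, true)]]).length = K + 1 ∧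
    pvDInv (PySem.List.pyGetD ((PySem.List.enumerate L 0).foldl (pvStepA (L.length : Int) (K : Int)) [PySem.Dict.ofList [(0, true)]]) (K : Int) PySem.Dict.empty)
      (pvCnt L K) := by
  have hmk : PySem.Dict.ofList [((0 : Int), true)] = PySem.Dict.mk [((0 : Int), true)] := by decide
  have hinv0 : pvOuterInv L K 0 [PySem.Dict.ofList [(0, true)]] := by
    constructor
    · simp
    · intro m hm hfr
      have hm0 : m = 0 := by omega
      subst hm0
      constructor
      · rw [hmk]
        decide
      · intro s
        rw [show PySem.List.pyGetD [PySem.Dict.ofList [((0 : Int), true)]] (((0 : Nat)) : Int) PySem.Dict.empty = PySem.Dict.ofList [((0 : Int), true)] from rfl]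
        rw [hmk, PySem.Dict.get?_mk_cons, pvCnt_zero]
        by_cases hs : s = 0
        · subst hs; simp
        · simp [hs, show ((0 : Int) == s) = false by simpa using fun h => hs h.symm]
          rfl
  have hfin := pvOuter_spec L K hK1 hKn L 0 [PySem.Dict.ofList [(0, true)]] rfl (by omega) hinv0
  obtain ⟨hflen, hfmv⟩ := hfin
  simp only [Nat.cast_zero] at hflen hfmv
  constructor
  · rw [hflen]
    omega
  · have hres := hfmv K (by omega) (by push_cast; omega)
    rw [List.take_length] at hres
    exact hres

-- ---- extracting the result sums from a dict satisfying pvDInv ----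

lemma pvSum_filterMap_if (l : List Int) (p : Int → Bool) :
    (l.filterMap (fun s => if p s then some s else none)).sum = (l.map (fun s => if p s then s else 0)).sum := by
  induction l with
  | nil => rfl
  | cons x t ih =>
    simp only [List.filterMap_cons, List.map_cons, List.sum_cons]
    by_cases h : p x <;> simp [h, ih]

lemma pvDInv_mem_keys (d : PySem.Dict Int Bool) (c : Int → Nat) (h : pvDInv d c) (s : Int) :
    s ∈ d.keys ↔ 0 < c s := by
  obtain ⟨hnd, hspec⟩ := h
  constructor
  · intro hs
    by_contra hc
    have h2 := hspec s
    rw [if_neg hc] at h2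
    exact (PySem.Dict.get?_eq_none_iff_not_mem_keys _ _).mp h2 hs
  · intro hs
    by_contra hc
    have h2 := (PySem.Dict.get?_eq_none_iff_not_mem_keys _ _).mpr hc
    rw [hspec s, if_pos hs] at h2
    exact absurd h2 (by simp)

lemma pvKeys_toFinset (d : PySem.Dict Int Bool) (cs : List Int) (h : pvDInv d (fun s => cs.count s)) :
    d.keys.toFinset = cs.toFinset := by
  apply Finset.ext
  intro s
  simp only [List.mem_toFinset]
  rw [pvDInv_mem_keys d _ h s, List.count_pos_iff]

lemma pvRes_eval (d : PySem.Dict Int Bool) (cs : List Int) (h : pvDInv d (fun s => cs.count s)) :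
    (d.items.filterMap (fun p => if p.2 then some p.1 else none)).sum = pvU cs := by
  have hnd := h.1
  have hspec := h.2
  rw [PySem.Dict.items_eq_map_keys d hnd false, List.filterMap_map]
  rw [List.filterMap_congr (g := fun s => if cs.count s == 1 then some s else none) ?hcg]
  case hcg =>
    intro s hs
    have hpos : 0 < cs.count s := (pvDInv_mem_keys d _ h s).mp hs
    simp only [Function.comp]
    rw [PySem.Dict.getD_eq_get?_getD, hspec s, if_pos hpos]
    rfl
  rw [pvSum_filterMap_if d.keys (fun s => cs.count s == 1)]
  rw [← List.sum_toFinset _ hnd, pvKeys_toFinset d cs h, pvU]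
  apply Finset.sum_congr rfl
  intro s _
  by_cases hc : cs.count s = 1 <;> simp [hc]

lemma pvVals_eval (d : PySem.Dict Int Bool) (cs : List Int) (h : pvDInv d (fun s => cs.count s)) :
    ((d.values.map (fun b => if b then (1 : Int) else 0)).sum) = ∑ s ∈ cs.toFinset, (if cs.count s = 1 then (1 : Int) else 0) := by
  have hnd := h.1
  have hspec := h.2
  have hvals : d.values = d.items.map Prod.snd := rfl
  rw [hvals, PySem.Dict.items_eq_map_keys d hnd false, List.map_map, List.map_map]
  have hcg : ∀ s ∈ d.keys, (((fun b => if b then (1 : Int) else 0) ∘ Prod.snd) ∘ fun k => (k, d.getD k false)) s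
      = (fun s => if cs.count s = 1 then (1 : Int) else 0) s := by
    intro s hs
    have hpos : 0 < cs.count s := (pvDInv_mem_keys d _ h s).mp hs
    have hval : d.getD s false = (cs.count s == 1) := by
      rw [PySem.Dict.getD_eq_get?_getD, hspec s, if_pos hpos]
      rfl
    simp only [Function.comp_apply]
    rw [hval]
    by_cases hc : cs.count s = 1 <;> simp [hc]
  rw [List.map_congr_left hcg, ← List.sum_toFinset _ hnd, pvKeys_toFinset d cs h]

lemma pvB_eval (nums : List Int) (k : Int) (hk : 0 ≤ k) :
    subsetsWithUniqueSumTotal_alt nums k = pvU (pvComboSums (PySem.List.sorted nums (fun x => x) false) k.toNat) := by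
  rw [subsetsWithUniqueSumTotal_alt, if_neg (by omega)]
  simp only []
  set cs := pvComboSums (PySem.List.sorted nums (fun x => x) false) k.toNat with hcs
  rw [PySem.Dict.foldl_insert_getD_add_one_eq_counter, PySem.Dict.items_counter, List.filterMap_map]
  rw [List.filterMap_congr (g := fun s => if cs.count s == 1 then some s else none) ?hcg]
  case hcg =>
    intro s _
    simp only [Function.comp]
    congr 1
    rw [show (((cs.count s : Nat) : Int) == (1 : Int)) = (cs.count s == 1) by
      by_cases hc : cs.count s = 1 <;> simp [hc]]
  rw [pvSum_filterMap_if (PySem.Set.ofList cs) (fun s => cs.count s == 1)]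
  rw [← PySem.List.dedup_eq_ofList, ← List.sum_toFinset _ (PySem.List.nodup_dedup cs)]
  have hset : (PySem.List.dedup cs).toFinset = cs.toFinset := by
    apply Finset.ext
    intro s
    simp [List.mem_toFinset]
  rw [hset, pvU]
  apply Finset.sum_congr rfl
  intro s _
  by_cases hc : cs.count s = 1 <;> simp [hc]

-- ---- complement symmetry ----

lemma pvCompl : ∀ (l : List Int) (r : Nat), r ≤ l.length →
    ((pvComboSums l (l.length - r) : List Int) : Multiset Int)
      = ((pvComboSums l r : List Int) : Multiset Int).map (fun s => l.sum - s) := by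
  intro l
  induction l with
  | nil =>
    intro r hr
    have hr0 : r = 0 := by simpa using hr
    subst hr0
    simp [pvComboSums]
  | cons x tl ih =>
    intro r hr
    cases r with
    | zero =>
      rw [Nat.sub_zero, pvComboSums_self (x :: tl), pvComboSums_zero]
      simp
    | succ r' =>
      have hr' : r' ≤ tl.length := by simpa using hr
      by_cases htop : r' = tl.length
      · subst htop
        rw [show (x :: tl).length - (tl.length + 1) = 0 by simp, pvComboSums_zero,
          show tl.length + 1 = (x :: tl).length from rfl, pvComboSums_self (x :: tl)]
        simp
      · have hlt : r' < tl.length := lt_of_le_of_ne hr' htop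
        have hsub : (x :: tl).length - (r' + 1) = (tl.length - (r' + 1)) + 1 := by
          simp only [List.length_cons]
          omega
        rw [hsub]
        show ((pvComboSums (x :: tl) ((tl.length - (r' + 1)) + 1) : List Int) : Multiset Int) = _
        simp only [pvComboSums]
        have e1 : tl.length - (r' + 1) + 1 = tl.length - r' := by omega
        push_cast [← Multiset.coe_add, ← Multiset.map_coe]
        rw [show ((pvComboSums tl (tl.length - (r' + 1)) : List Int) : Multiset Int)
              = Multiset.map (fun s => tl.sum - s) (pvComboSums tl (r' + 1) : List Int) from ih (r' + 1) (by omega),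
            show ((pvComboSums tl (tl.length - (r' + 1) + 1) : List Int) : Multiset Int)
              = Multiset.map (fun s => tl.sum - s) (pvComboSums tl r' : List Int) from e1 ▸ ih r' (by omega)]
        rw [Multiset.map_add, add_comm]
        congr 1
        · rw [Multiset.map_map]
          apply Multiset.map_congr rfl
          intro s _
          simp only [Function.comp_apply, List.sum_cons]
          ring
        · rw [Multiset.map_map]
          apply Multiset.map_congr rfl
          intro s _
          simp only [Function.comp_apply, List.sum_cons]
          ring

lemma pvCompl_count (l : List Int) (r : Nat) (hr : r ≤ l.length) (s : Int) :
    pvCnt l (l.length - r) (l.sum - s) = pvCnt l r s := by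
  have hinj : Function.Injective (fun s : Int => l.sum - s) := fun a b h => by
    simp only at h
    omega
  have h1 := pvCompl l r hr
  unfold pvCnt
  rw [← Multiset.coe_count, ← Multiset.coe_count, h1,
    Multiset.count_map_eq_count' _ _ hinj]

lemma pvCompl_toFinset (l : List Int) (r : Nat) (hr : r ≤ l.length) :
    (pvComboSums l (l.length - r)).toFinset = (pvComboSums l r).toFinset.image (fun s => l.sum - s) := by
  have h1 := pvCompl l r hr
  have h2 : (pvComboSums l (l.length - r)).toFinset = ((pvComboSums l (l.length - r) : List Int) : Multiset Int).toFinset := rfl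
  have h3 : (pvComboSums l r).toFinset = ((pvComboSums l r : List Int) : Multiset Int).toFinset := rfl
  rw [h2, h3, h1, Multiset.toFinset_map]


-- ===== VERDICT (by name: the statement is the Claim_ definition above) =====
theorem subsetsWithUniqueSumTotal_spec : Claim_unchanged_subsetsWithUniqueSumTotal := by
  intro nums k hDom hnd
  have hD0 : k ≠ 0 := fun h => hnd (Or.inl h)
  have hshift : k <<< (1 : Nat) = 2 * k := by rw [Int.shiftLeft_eq]; ring
  set L := PySem.List.sorted nums (fun x => x) false with hL
  have hlenL : L.length = nums.length := PySem.List.length_sorted nums _ false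
  have hsumL : L.sum = nums.sum := (PySem.List.sorted_perm nums _ false).sum_eq
  have hn0 : (0 : Int) ≤ (nums.length : Int) := by positivity
  rw [subsetsWithUniqueSumTotal]
  simp only [hshift, ← hL]
  by_cases hkneg : k < 0
  · rw [if_neg (by omega : ¬ 2 * k > (nums.length : Int)), if_pos hkneg,
      subsetsWithUniqueSumTotal_alt, if_pos hkneg]
  · by_cases hkn : k > (nums.length : Int)
    · rw [if_pos (show 2 * k > (nums.length : Int) by omega),
        if_pos (show (nums.length : Int) - k < 0 by omega)]
      rw [pvB_eval nums k (by omega), ← hL]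
      rw [pvComboSums_of_lt L k.toNat (by omega), pvU]
      simp
    · by_cases hkeqn : k = (nums.length : Int)
      · have hsum1 : nums.sum = 1 := by
          by_contra hc
          exact hnd (Or.inr ⟨hkeqn, hc⟩)
        have hn1 : 1 ≤ (nums.length : Int) := by omega
        rw [if_pos (show 2 * k > (nums.length : Int) by omega),
          if_neg (show ¬ ((nums.length : Int) - k < 0) by omega),
          if_pos (show (nums.length : Int) - k = 0 by omega)]
        rw [pvB_eval nums k (by omega), ← hL]
        have hkt : k.toNat = L.length := by omega
        rw [hkt, pvComboSums_self L, pvU]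
        simp [hsumL, hsum1]
      · -- 1 ≤ k < len nums
        have hk1 : 1 ≤ k := by omega
        have hkltn : k < (nums.length : Int) := by omega
        by_cases hflip : 2 * k > (nums.length : Int)
        · -- complement branch
          set K : Nat := ((nums.length : Int) - k).toNat with hKdef
          have hKcast : (K : Int) = (nums.length : Int) - k := by omega
          have hK1 : 1 ≤ K := by omega
          have hKn : K ≤ L.length := by omega
          obtain ⟨hflen, hfdinv⟩ := pvA_dict L K hK1 hKn
          rw [if_pos hflip, if_neg (by omega), if_neg (by omega)]
          have hnL : ((nums.length : Nat) : Int) = ((L.length : Nat) : Int) := by rw [hlenL]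
          rw [hnL, show (L.length : Int) - k = (K : Int) by omega]
          rw [hflen]
          rw [if_neg (by push_cast; omega)]
          set cs := pvComboSums L K with hcs
          have hdinv : pvDInv (PySem.List.pyGetD ((PySem.List.enumerate L 0).foldl (pvStepA (L.length : Int) (K : Int)) [PySem.Dict.ofList [(0, true)]]) (K : Int) PySem.Dict.empty) (fun s => cs.count s) :=
            pvDInv_congr _ _ _ (fun s => rfl) hfdinv
          rw [pvRes_eval _ cs hdinv, pvVals_eval _ cs hdinv]
          rw [if_pos (by simp only [decide_eq_true_eq]; omega)]
          rw [pvB_eval nums k (by omega), ← hL]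
          set cs' := pvComboSums L k.toNat with hcs'
          have hr : k.toNat ≤ L.length := by omega
          have hKr : L.length - k.toNat = K := by omega
          have hinj : Function.Injective (fun s : Int => L.sum - s) := fun a b hab => by
            simp only at hab; omega
          have hsets : cs.toFinset = cs'.toFinset.image (fun s => L.sum - s) := by
            rw [hcs, ← hKr]
            exact pvCompl_toFinset L k.toNat hr
          simp only [pvU]
          rw [Finset.mul_sum, ← Finset.sum_sub_distrib, hsets,
            Finset.sum_image (fun a _ b _ hab => hinj hab)]
          apply Finset.sum_congr rfl
          intro t _
          have hcnt : cs.count (L.sum - t) = cs'.count t := by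
            have := pvCompl_count L k.toNat hr t
            rw [hKr] at this
            exact this
          rw [hcnt]
          by_cases hc : cs'.count t = 1 <;> simp [hc] <;> omega
        · -- direct branch
          set K : Nat := k.toNat with hKdef
          have hKcast : (K : Int) = k := by omega
          have hK1 : 1 ≤ K := by omega
          have hKn : K ≤ L.length := by omega
          obtain ⟨hflen, hfdinv⟩ := pvA_dict L K hK1 hKn
          rw [if_neg hflip, if_neg (by omega), if_neg (by omega)]
          have hnL : ((nums.length : Nat) : Int) = ((L.length : Nat) : Int) := by rw [hlenL]
          rw [hnL]
          rw [hKcast] at hflen hfdinv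
          rw [hflen]
          rw [if_neg (by push_cast; omega)]
          set cs := pvComboSums L K with hcs
          have hdinv : pvDInv (PySem.List.pyGetD ((PySem.List.enumerate L 0).foldl (pvStepA (L.length : Int) k) [PySem.Dict.ofList [(0, true)]]) k PySem.Dict.empty) (fun s => cs.count s) :=
            pvDInv_congr _ _ _ (fun s => rfl) hfdinv
          rw [pvRes_eval _ cs hdinv]
          rw [if_neg (by simp only [decide_eq_true_eq]; omega)]
          rw [pvB_eval nums k (by omega), ← hL]

theorem subsetsWithUniqueSumTotal_changed : Claim_changed_subsetsWithUniqueSumTotal := by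
  unfold Claim_changed_subsetsWithUniqueSumTotal; decide
theorem subsetsWithUniqueSumTotal_tight : Claim_exact_subsetsWithUniqueSumTotal := by
  intro nums k hDom hD
  have hshift : k <<< (1 : Nat) = 2 * k := by rw [Int.shiftLeft_eq]; ring
  set L := PySem.List.sorted nums (fun x => x) false with hL
  have hlenL : L.length = nums.length := PySem.List.length_sorted nums _ false
  have hsumL : L.sum = nums.sum := (PySem.List.sorted_perm nums _ false).sum_eq
  have hn0 : (0 : Int) ≤ (nums.length : Int) := by positivity
  rw [subsetsWithUniqueSumTotal]
  simp only [hshift, ← hL]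
  rcases hD with hk0 | ⟨hkn, hsum⟩
  · subst hk0
    rw [if_neg (show ¬ 2 * (0 : Int) > (nums.length : Int) by omega),
      if_neg (show ¬ ((0 : Int) < 0) by omega), if_pos (show (0 : Int) = 0 from rfl)]
    rw [pvB_eval nums 0 le_rfl, ← hL]
    rw [show (0 : Int).toNat = 0 from rfl, pvComboSums_zero]
    simp [pvU]
  · by_cases hn1 : nums.length = 0
    · -- empty list: k = 0 after all
      rw [if_neg (show ¬ 2 * k > (nums.length : Int) by omega),
        if_neg (show ¬ (k < 0) by omega), if_pos (show k = 0 by omega)]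
      rw [pvB_eval nums k (by omega), ← hL]
      rw [show k.toNat = 0 by omega, pvComboSums_zero]
      simp [pvU]
    · rw [if_pos (show 2 * k > (nums.length : Int) by omega),
        if_neg (show ¬ ((nums.length : Int) - k < 0) by omega),
        if_pos (show (nums.length : Int) - k = 0 by omega)]
      rw [pvB_eval nums k (by omega), ← hL]
      rw [show k.toNat = L.length by omega, pvComboSums_self L]
      simp [pvU, hsumL]
      omega
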